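-- pv_equiv track=rewrite | github.com/sindux/cp | fb-hc/2021/a1.py | a1
-- ===== SOURCE A (Python) =====
-- from collections import Counter
--
-- def a1(s):
--     vow = 'AIUEO'
--     c = Counter(s)
--     ans = len(s)*2
--     if all(ch in vow for ch in c) or all(ch not in vow for ch in c):
--         ans = len(s)
--     for ch,v in c.items():
--         t=0
--         isvowel = ch in vow
--         for ch2,v2 in c.items():
--             if ch2==ch: continue
--             isvowel2 = ch2 in vow
--             if isvowel==isvowel2: t+=v2*2
--             else: t+=v2
--         ans=min(ans,t)
--     return ans
-- ===== SOURCE B (Python) =====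
-- def a1(s):
--     vow = 'AIUEO'
--     counts = {}
--     V = 0
--     C = 0
--     for ch in s:
--         counts[ch] = counts.get(ch, 0) + 1
--         if ch in vow:
--             V += 1
--         else:
--             C += 1
--     ans = len(s) * 2
--     if V == 0 or C == 0:
--         ans = len(s)
--     for ch, v in counts.items():
--         t = 2 * (V - v) + C if ch in vow else 2 * (C - v) + V
--         if t < ans:
--             ans = t
--     return ans
-- ===== Notes on version B (the rewrite author's own statement) =====
-- stated objective: simpler
-- what changed: B precomputes the total vowel count V and consonant count C in its single counting pass and derives each distinct character's deletion cost by direct arithmetic (2*(V-v)+C or 2*(C-v)+V), instead of A's nested scan over all pairs of distinct characters.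
import Mathlib
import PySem

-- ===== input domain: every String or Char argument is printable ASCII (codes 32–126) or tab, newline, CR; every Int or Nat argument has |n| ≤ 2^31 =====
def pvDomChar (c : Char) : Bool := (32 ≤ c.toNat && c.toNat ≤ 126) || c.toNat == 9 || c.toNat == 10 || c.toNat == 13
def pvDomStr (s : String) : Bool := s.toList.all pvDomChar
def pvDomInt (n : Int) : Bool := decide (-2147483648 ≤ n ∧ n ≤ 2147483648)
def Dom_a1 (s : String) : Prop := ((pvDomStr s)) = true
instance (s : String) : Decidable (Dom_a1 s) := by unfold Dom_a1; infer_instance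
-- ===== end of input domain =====

-- B precomputes vowel/consonant totals V and C in its single counting pass and derives each
-- distinct character's deletion cost by direct arithmetic instead of A's scan over all pairs
-- of distinct characters (objective: simpler; not measured faster).

-- ===== PORT A =====
-- the module constant vow = 'AIUEO', as a character list
def vowL : List Char := "AIUEO".toList

def a1 (s : String) : Int :=
  let c := PySem.Dict.counter s.toList
  let ans : Int := PySem.Str.len s * 2
  let ans : Int :=
    if (c.keys.all (fun ch => vowL.contains ch)) || (c.keys.all (fun ch => !(vowL.contains ch)))
    then PySem.Str.len s else ans
  c.items.foldl (fun ans p =>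
    let t : Int := c.items.foldl (fun t q =>
      if q.1 == p.1 then t
      else if vowL.contains p.1 == vowL.contains q.1 then t + q.2 * 2
      else t + q.2) 0
    min ans t) ans

-- ===== PORT B =====
def a1_alt (s : String) : Int :=
  let st := s.toList.foldl
    (fun (st : PySem.Dict Char Int × Int × Int) ch =>
      (st.1.insert ch (st.1.getD ch 0 + 1),
       (if vowL.contains ch then st.2.1 + 1 else st.2.1),
       (if vowL.contains ch then st.2.2 else st.2.2 + 1)))
    (PySem.Dict.empty, 0, 0)
  let counts := st.1
  let V := st.2.1
  let C := st.2.2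
  let ans : Int := PySem.Str.len s * 2
  let ans : Int := if V == 0 || C == 0 then PySem.Str.len s else ans
  counts.items.foldl (fun ans p =>
    let t : Int := if vowL.contains p.1 then 2 * (V - p.2) + C else 2 * (C - p.2) + V
    if t < ans then t else ans) ans

-- ===== PRECONDITION & SPEC =====
def Spec_a1 (s : String) (out : Int) : Prop := out = a1_alt s
instance (s : String) (out : Int) : Decidable (Spec_a1 s out) := by unfold Spec_a1; infer_instance

-- ===== CLAIM (what is proved, stated in full; the proofs are below) =====
def Claim_equal_a1 : Prop := ∀ (s : String), Dom_a1 s → Spec_a1 s (a1 s)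

-- ===== LEMMAS AND PROOFS =====

-- sum over a Nodup list containing k, with the k-entry zeroed out
theorem sum_map_zero_at (K : List Char) (k : Char) (u : Char → Int)
    (hnd : K.Nodup) (hk : k ∈ K) :
    (K.map (fun k2 => if k2 == k then 0 else u k2)).sum = (K.map u).sum - u k := by
  induction K with
  | nil => cases hk
  | cons x K ih =>
    rcases List.nodup_cons.mp hnd with ⟨hx, hnd'⟩
    rcases List.mem_cons.mp hk with h | h
    · subst h
      have hcongr : ∀ k2 ∈ K, (if k2 == k then (0:Int) else u k2) = u k2 := by
        intro k2 hm
        have : k2 ≠ k := fun e => hx (e ▸ hm)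
        simp [this]
      rw [List.map_cons, List.map_cons, List.sum_cons, List.sum_cons,
          List.map_congr_left hcongr]
      simp only [beq_self_eq_true, if_true]
      ring
    · have hne : ¬ (x == k) = true := by
        intro e; exact hx ((beq_iff_eq.mp e) ▸ h)
      simp only [List.map_cons, List.sum_cons, if_neg hne, ih hnd' h]
      ring

-- weighted class sums: same class costs twice, the other class once
theorem sum_map_w2 (K : List Char) (p : Char → Bool) (cnt : Char → Int) :
    (K.map (fun k2 => if p k2 then cnt k2 * 2 else cnt k2)).sum
      = 2 * (K.map (fun k2 => if p k2 then cnt k2 else 0)).sum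
        + (K.map (fun k2 => if p k2 then 0 else cnt k2)).sum := by
  induction K with
  | nil => simp
  | cons x K ih => by_cases h : p x = true <;> simp [h, ih] <;> ring

theorem sum_map_w2' (K : List Char) (p : Char → Bool) (cnt : Char → Int) :
    (K.map (fun k2 => if p k2 then cnt k2 else cnt k2 * 2)).sum
      = 2 * (K.map (fun k2 => if p k2 then 0 else cnt k2)).sum
        + (K.map (fun k2 => if p k2 then cnt k2 else 0)).sum := by
  induction K with
  | nil => simp
  | cons x K ih => by_cases h : p x = true <;> simp [h, ih] <;> ring

-- an ite-sum is a filtered sum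
theorem sum_map_ite_eq_filter (K : List Char) (p : Char → Bool) (cnt : Char → Int) :
    (K.map (fun k2 => if p k2 then cnt k2 else 0)).sum = ((K.filter p).map cnt).sum := by
  induction K with
  | nil => rfl
  | cons x K ih => by_cases h : p x = true <;> simp [h, ih]

-- the class total over the distinct characters equals the class count over the string
theorem sum_count_ofList (L : List Char) (p : Char → Bool) :
    ((PySem.Set.ofList L).map (fun k2 => if p k2 then (L.count k2 : Int) else 0)).sum
      = (L.countP p : Int) := by
  rw [sum_map_ite_eq_filter]
  have hperm : (PySem.Set.ofList L).Perm L.dedup := by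
    refine (List.perm_ext_iff_of_nodup (PySem.Set.nodup_ofList L) L.nodup_dedup).mpr ?_
    intro x
    simp [PySem.Set.mem_ofList, List.mem_dedup]
  have h2 : (((PySem.Set.ofList L).filter p).map (fun k2 => (L.count k2 : Int))).sum
      = (((L.dedup.filter p).map (fun k2 => (L.count k2 : Int)))).sum :=
    ((hperm.filter p).map _).sum_eq
  rw [h2, ← List.sum_map_count_dedup_filter_eq_countP p L]
  simpa [List.map_map, Function.comp_def] using
    (Nat.cast_list_sum (R := Int) ((L.dedup.filter p).map (fun x => List.count x L))).symm

-- the complementary class, written with the branches swapped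
theorem sum_count_ofList_not (L : List Char) (p : Char → Bool) :
    ((PySem.Set.ofList L).map (fun k2 => if p k2 then 0 else (L.count k2 : Int))).sum
      = (L.countP (fun x => !p x) : Int) := by
  rw [← sum_count_ofList L (fun x => !p x)]
  refine congrArg List.sum (List.map_congr_left ?_)
  intro k2 _
  cases h : p k2 <;> simp [h]

-- A's inner scan over the counter items, in closed form
theorem tA_closed (L : List Char) (k : Char) (hk : k ∈ PySem.Set.ofList L) :
    ((PySem.Dict.counter L).items.foldl (fun t q =>
        if q.1 == k then t
        else if vowL.contains k == vowL.contains q.1 then t + q.2 * 2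
        else t + q.2) 0)
      = (if vowL.contains k
          then 2 * ((L.countP (fun x => vowL.contains x) : Int) - (L.count k : Int))
                 + (L.countP (fun x => !vowL.contains x) : Int)
          else 2 * ((L.countP (fun x => !vowL.contains x) : Int) - (L.count k : Int))
                 + (L.countP (fun x => vowL.contains x) : Int)) := by
  have hfold :
      ((PySem.Dict.counter L).items.foldl (fun t q =>
        if q.1 == k then t
        else if vowL.contains k == vowL.contains q.1 then t + q.2 * 2
        else t + q.2) 0)
      = 0 + ((PySem.Dict.counter L).items.map (fun q =>
          if q.1 == k then 0
          else if vowL.contains k == vowL.contains q.1 then q.2 * 2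
          else q.2)).sum := by
    rw [← PySem.List.foldl_add]
    apply PySem.List.foldl_congr_mem
    intro acc q _
    split_ifs <;> ring
  rw [hfold, PySem.Dict.items_counter, List.map_map]
  cases hv : vowL.contains k
  · -- consonant head: the other-class test 'false == contains k2' is '!contains k2'
    have hcongr : ∀ k2 ∈ PySem.Set.ofList L,
        ((fun q => if q.1 == k then (0:Int)
            else if false == vowL.contains q.1 then q.2 * 2 else q.2) ∘
          fun k2 => (k2, (L.count k2 : Int))) k2
        = (fun k2 => if k2 == k then (0:Int)
            else (fun k2 => if vowL.contains k2 then (L.count k2 : Int)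
                            else (L.count k2 : Int) * 2) k2) k2 := by
      intro k2 _
      simp only [Function.comp_apply]
      by_cases hkk : (k2 == k) = true
      · simp only [hkk, if_true]
      · cases h2 : vowL.contains k2 <;> simp only [hkk] <;> simp [h2]
    rw [List.map_congr_left hcongr,
        sum_map_zero_at (PySem.Set.ofList L) k _ (PySem.Set.nodup_ofList L) hk,
        sum_map_w2' (PySem.Set.ofList L) (fun x => vowL.contains x) _,
        sum_count_ofList L (fun x => vowL.contains x),
        sum_count_ofList_not L (fun x => vowL.contains x), hv]
    simp only [Bool.false_eq_true, if_false]
    ring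
  · -- vowel head
    have hcongr : ∀ k2 ∈ PySem.Set.ofList L,
        ((fun q => if q.1 == k then (0:Int)
            else if true == vowL.contains q.1 then q.2 * 2 else q.2) ∘
          fun k2 => (k2, (L.count k2 : Int))) k2
        = (fun k2 => if k2 == k then (0:Int)
            else (fun k2 => if vowL.contains k2 then (L.count k2 : Int) * 2
                            else (L.count k2 : Int)) k2) k2 := by
      intro k2 _
      simp only [Function.comp_apply]
      by_cases hkk : (k2 == k) = true
      · simp only [hkk, if_true]
      · cases h2 : vowL.contains k2 <;> simp only [hkk] <;> simp [h2]
    rw [List.map_congr_left hcongr,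
        sum_map_zero_at (PySem.Set.ofList L) k _ (PySem.Set.nodup_ofList L) hk,
        sum_map_w2 (PySem.Set.ofList L) (fun x => vowL.contains x) _,
        sum_count_ofList L (fun x => vowL.contains x),
        sum_count_ofList_not L (fun x => vowL.contains x), hv]
    simp only [if_true]
    ring

-- ===== VERDICT (by name: the statement is the Claim_ definition above) =====
theorem a1_spec : Claim_equal_a1 := by
  intro s _
  unfold Spec_a1 a1 a1_alt
  simp only []
  rw [PySem.List.foldl_prod_mk
        (f := fun (d : PySem.Dict Char Int) ch => d.insert ch (d.getD ch 0 + 1))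
        (g := fun (vc : Int × Int) ch =>
          ((if vowL.contains ch then vc.1 + 1 else vc.1),
           (if vowL.contains ch then vc.2 else vc.2 + 1))),
      PySem.List.foldl_prod_mk
        (f := fun (v : Int) ch => if vowL.contains ch then v + 1 else v)
        (g := fun (c : Int) ch => if vowL.contains ch then c else c + 1),
      PySem.Dict.foldl_insert_getD_add_one_eq_counter]
  have hV : s.toList.foldl (fun v ch => if vowL.contains ch then v + 1 else v) (0:Int)
      = (s.toList.countP (fun ch => vowL.contains ch) : Int) := by
    rw [PySem.List.foldl_if_add_one]
    ring
  have hC : s.toList.foldl (fun c ch => if vowL.contains ch then c else c + 1) (0:Int)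
      = (s.toList.countP (fun ch => !vowL.contains ch) : Int) := by
    have h1 : s.toList.foldl (fun c ch => if vowL.contains ch then c else c + 1) (0:Int)
        = s.toList.foldl (fun c ch => if !vowL.contains ch then c + 1 else c) (0:Int) := by
      apply PySem.List.foldl_congr_mem
      intro acc x _
      cases h : vowL.contains x <;> simp [h]
    rw [h1, PySem.List.foldl_if_add_one]
    ring
  simp only [hV, hC, PySem.Dict.keys_counter]
  have hcond : ((PySem.Set.ofList s.toList).all (fun ch => vowL.contains ch)
        || (PySem.Set.ofList s.toList).all (fun ch => !vowL.contains ch))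
      = (((s.toList.countP (fun ch => vowL.contains ch) : Int) == 0)
        || ((s.toList.countP (fun ch => !vowL.contains ch) : Int) == 0)) := by
    have ha : (PySem.Set.ofList s.toList).all (fun ch => vowL.contains ch)
        = ((s.toList.countP (fun ch => !vowL.contains ch) : Int) == 0) := by
      apply Bool.eq_iff_iff.mpr
      simp [List.all_eq_true, PySem.Set.mem_ofList, List.countP_eq_zero]
    have hb : (PySem.Set.ofList s.toList).all (fun ch => !vowL.contains ch)
        = ((s.toList.countP (fun ch => vowL.contains ch) : Int) == 0) := by
      apply Bool.eq_iff_iff.mpr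
      simp [List.all_eq_true, PySem.Set.mem_ofList, List.countP_eq_zero]
    rw [ha, hb, Bool.or_comm]
  rw [hcond]
  apply PySem.List.foldl_congr_mem
  intro acc q hq
  rw [PySem.Dict.items_counter] at hq
  rcases List.mem_map.mp hq with ⟨k, hkK, hkq⟩
  subst hkq
  rw [tA_closed s.toList k hkK]
  rw [min_def]
  split_ifs <;> omega
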